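-- pv_equiv track=rewrite | github.com/faiyaz72/codingPractice | Graphs/dfs.py | generate_all_roll
-- ===== SOURCE A (Python) =====
-- def generate_all_roll(n, k):
--     def dfs(start_index, path, res):
--         if (start_index == k):
--             res.append(list(path))
--             return
--         for i in range(1, n+1):
--             path.append(i)
--             dfs(start_index + 1, path, res)
--             path.pop();
--     res = []
--     dfs(0, [], res)
--     return res
-- ===== SOURCE B (Python) =====
-- def generate_all_roll(n, k):
--     res = [[]]
--     for _ in range(k):
--         if not res:
--             break
--         res = [prefix + [i] for prefix in res for i in range(1, n + 1)]
--     return res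
-- ===== Notes on version B (the rewrite author's own statement) =====
-- stated objective: alternative
-- what changed: Replaces the recursive backtracking DFS mutating a single path with an iterative layer-by-layer build that extends every prefix by each value 1..n, k times.
-- outside the precondition, e.g. on generate_all_roll(0, -1): A returns [], B returns [[]]
import Mathlib
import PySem

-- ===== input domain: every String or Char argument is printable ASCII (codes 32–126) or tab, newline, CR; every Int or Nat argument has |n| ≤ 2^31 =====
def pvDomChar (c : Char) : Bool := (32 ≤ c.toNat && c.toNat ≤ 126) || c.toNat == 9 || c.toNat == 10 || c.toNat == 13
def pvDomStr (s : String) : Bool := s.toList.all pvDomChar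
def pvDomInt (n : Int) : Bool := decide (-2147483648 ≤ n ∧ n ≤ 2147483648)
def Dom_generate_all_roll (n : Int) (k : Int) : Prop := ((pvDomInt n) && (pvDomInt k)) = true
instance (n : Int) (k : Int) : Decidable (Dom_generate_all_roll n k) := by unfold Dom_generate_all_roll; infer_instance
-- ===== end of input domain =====

-- B replaces A's recursive backtracking DFS with an iterative layer-by-layer build of all prefixes (alternative decomposition, same cost).


-- ===== PORT A =====
-- dfs: the Python mutates `path`/`res`; functionally, each call returns the extended `res`.
-- The `start < k` guard only makes the recursion total: Python diverges past k (excluded by Pre_).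
def pvDfsA (n : Int) (k : Int) (start : Int) (path : List Int) (res : List (List Int)) :
    List (List Int) :=
  if start = k then res ++ [path]
  else if h : start < k then
    (PySem.List.pyRange 1 (n + 1) 1).foldl
      (fun r i => pvDfsA n k (start + 1) (path ++ [i]) r) res
  else res
termination_by (k - start).toNat
decreasing_by omega

def generate_all_roll (n : Int) (k : Int) : List (List Int) :=
  pvDfsA n k 0 [] []

-- ===== PORT B =====
-- 'for _ in range(k)' as recursion on the remaining iteration count;
-- 'if not res: break' is the early return on res = []
def pvLoopB (n : Int) : Nat → List (List Int) → List (List Int)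
  | 0, res => res
  | m + 1, res =>
    if res = [] then res
    else pvLoopB n m
      (res.flatMap (fun pfx => (PySem.List.pyRange 1 (n + 1) 1).map (fun i => pfx ++ [i])))

def generate_all_roll_alt (n : Int) (k : Int) : List (List Int) :=
  pvLoopB n k.toNat [[]]

-- ===== PRECONDITION & SPEC =====
-- Pre_ excludes k < 0, outside the function's natural domain (a negative sequence length):
-- there A's DFS never meets its base case — it raises RecursionError when n ≥ 1, and when
-- n ≤ 0 returns [] while B returns [[]], neither value being specified for negative length.
def Pre_generate_all_roll (n : Int) (k : Int) : Prop := 0 ≤ k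
instance (n : Int) (k : Int) : Decidable (Pre_generate_all_roll n k) := by
  unfold Pre_generate_all_roll; infer_instance

def pvWitness_generate_all_roll : Int × Int := (2, 2)

def Spec_generate_all_roll (n : Int) (k : Int) (out : List (List Int)) : Prop :=
  out = generate_all_roll_alt n k
instance (n : Int) (k : Int) (out : List (List Int)) : Decidable (Spec_generate_all_roll n k out) := by
  unfold Spec_generate_all_roll; infer_instance

-- ===== CLAIM (what is proved, stated in full; the proofs are below) =====
def Claim_equal_generate_all_roll : Prop := ∀ (n : Int) (k : Int), Dom_generate_all_roll n k → Pre_generate_all_roll n k → Spec_generate_all_roll n k (generate_all_roll n k)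

-- ===== LEMMAS AND PROOFS =====

-- one build step: extend every pfx by every value of 1..n
def pvStep (n : Int) (res : List (List Int)) : List (List Int) :=
  res.flatMap (fun pfx => (PySem.List.pyRange 1 (n + 1) 1).map (fun i => pfx ++ [i]))

theorem pvStep_append (n : Int) (L1 L2 : List (List Int)) :
    pvStep n (L1 ++ L2) = pvStep n L1 ++ pvStep n L2 := by
  simp [pvStep]

theorem pvStep_iterate_append (n : Int) (m : Nat) (L1 L2 : List (List Int)) :
    (pvStep n)^[m] (L1 ++ L2) = (pvStep n)^[m] L1 ++ (pvStep n)^[m] L2 := by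
  induction m generalizing L1 L2 with
  | zero => simp
  | succ m ih => simp [Function.iterate_succ_apply, pvStep_append, ih]

theorem pvStep_iterate_nil (n : Int) (m : Nat) : (pvStep n)^[m] ([] : List (List Int)) = [] := by
  induction m with
  | zero => rfl
  | succ m ih => rw [Function.iterate_succ_apply]; simp [pvStep, ih]

theorem pvStep_iterate_map (n : Int) (m : Nat) (f : Int → List Int) (l : List Int) :
    (pvStep n)^[m] (l.map f) = l.flatMap (fun i => (pvStep n)^[m] [f i]) := by
  induction l with
  | nil => simp [pvStep_iterate_nil]
  | cons a l ih =>
    rw [List.map_cons, show f a :: l.map f = [f a] ++ l.map f from rfl,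
      pvStep_iterate_append, ih, List.flatMap_cons]

theorem pvDfsA_eq (n : Int) (k : Int) (m : Nat) :
    ∀ (start : Int) (path : List Int) (res : List (List Int)),
      (k - start).toNat = m → start ≤ k →
      pvDfsA n k start path res = res ++ (pvStep n)^[m] [path] := by
  induction m with
  | zero =>
    intro start path res hm hle
    have hsk : start = k := by omega
    rw [pvDfsA]
    simp [hsk]
  | succ m ih =>
    intro start path res hm hle
    have hlt : start < k := by omega
    rw [pvDfsA]
    rw [if_neg (by omega), dif_pos hlt]
    have hrec : ∀ (r : List (List Int)) (i : Int),
        pvDfsA n k (start + 1) (path ++ [i]) r = r ++ (pvStep n)^[m] [path ++ [i]] := by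
      intro r i
      exact ih (start + 1) (path ++ [i]) r (by omega) (by omega)
    calc (PySem.List.pyRange 1 (n + 1) 1).foldl
            (fun r i => pvDfsA n k (start + 1) (path ++ [i]) r) res
        = (PySem.List.pyRange 1 (n + 1) 1).foldl
            (fun r i => r ++ (pvStep n)^[m] [path ++ [i]]) res := by
          exact PySem.List.foldl_congr_mem _ _ _ _ (fun r i _ => hrec r i)
      _ = res ++ (PySem.List.pyRange 1 (n + 1) 1).flatMap
            (fun i => (pvStep n)^[m] [path ++ [i]]) :=
          PySem.List.foldl_append_eq_flatMap _ _ _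
      _ = res ++ (pvStep n)^[m] (pvStep n [path]) := by
          rw [show pvStep n [path]
                = (PySem.List.pyRange 1 (n + 1) 1).map (fun i => path ++ [i]) by
              simp [pvStep], pvStep_iterate_map]
      _ = res ++ (pvStep n)^[m + 1] [path] := by
          rw [Function.iterate_succ_apply]

theorem pvLoopB_eq (n : Int) (m : Nat) (res : List (List Int)) :
    pvLoopB n m res = (pvStep n)^[m] res := by
  induction m generalizing res with
  | zero => rfl
  | succ m ih =>
    rw [pvLoopB]
    by_cases h : res = []
    · simp [h, pvStep_iterate_nil]
    · rw [if_neg h, ih, Function.iterate_succ_apply]; rfl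

-- ===== VERDICT (by name: the statement is the Claim_ definition above) =====
theorem generate_all_roll_spec : Claim_equal_generate_all_roll := by
  intro n k _ hk
  unfold Spec_generate_all_roll generate_all_roll generate_all_roll_alt
  rw [pvDfsA_eq n k (k - 0).toNat 0 [] [] rfl hk, pvLoopB_eq]
  simp
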